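-- pv_equiv track=rewrite | github.com/misken/pymwts | pymwts/pymwtsio/infiles/mwts_inputs_example/mwts_makedat.py | num_full_weekends
-- ===== SOURCE A (Python) =====
-- def num_full_weekends(x,wkendtype):
--     """
--     Returns number of full weekends (both days) worked in a given weekends worked pattern.
--
--     Inputs:
--           x - list of 2-tuples representing weekend days worked. Each list
--             element is one week. The tuple of binary values represent the
--             first and second day of the weekend for that week. A 1 means
--             the day is worked, a 0 means it is off.
--
--           wkendtype - 1 --> weekend consists of Saturday and Sunday
--                  2 --> weekend consists of Friday and Saturday
--
--     Output:
--         Number of full weekends worked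
--
--     Example:
--         n = num_full_weekends([(0,1),(1,0),(0,1),(1,0)],1)
--         # n = 2
--
--         n = num_full_weekends([(0,1),(1,0),(0,1),(0,0)],1)
--         # n = 1
--
--         n = num_full_weekends([(1,1),(1,0),(1,1),(1,0)],2)
--         # n = 2
--
--         n = num_full_weekends([(0,1),(1,0),(0,1),(0,0)],2)
--         # n = 0
--
--     """
--     if wkendtype == 2:
--         L1 = [sum(j) for j in x]
--         n = sum([(1 if j == 2 else 0) for j in L1])
--     else:
--         n = 0
--         for j in range(len(x)):
--             if j < len(x) - 1:
--                 if x[j][1] == 1 and x[j+1][0] == 1: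
--                     n += 1
--             else:
--                 if x[j][1] == 1 and x[0][0] == 1:
--                     n += 1
--
--     return n
-- ===== SOURCE B (Python) =====
-- def num_full_weekends(x, wkendtype):
--     n = len(x)
--     if wkendtype == 2:
--         return len({j for j in range(n) if x[j][0] + x[j][1] == 2})
--     ends = {j for j in range(n) if x[j][1] == 1}
--     starts_prev = {(j - 1) % n for j in range(n) if x[j][0] == 1}
--     return len(ends & starts_prev)
-- ===== Notes on version B (the rewrite author's own statement) =====
-- stated objective: alternative
-- what changed: A scans indices with a j<len-1 boundary branch and wraparound; B instead builds two index sets - weeks whose second day is worked, and the cyclic predecessor (j-1) mod n of weeks whose first day is worked - and returns the cardinality of their intersection (the wkendtype==2 branch likewise becomes the cardinality of a filtered index set).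
import Mathlib
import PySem

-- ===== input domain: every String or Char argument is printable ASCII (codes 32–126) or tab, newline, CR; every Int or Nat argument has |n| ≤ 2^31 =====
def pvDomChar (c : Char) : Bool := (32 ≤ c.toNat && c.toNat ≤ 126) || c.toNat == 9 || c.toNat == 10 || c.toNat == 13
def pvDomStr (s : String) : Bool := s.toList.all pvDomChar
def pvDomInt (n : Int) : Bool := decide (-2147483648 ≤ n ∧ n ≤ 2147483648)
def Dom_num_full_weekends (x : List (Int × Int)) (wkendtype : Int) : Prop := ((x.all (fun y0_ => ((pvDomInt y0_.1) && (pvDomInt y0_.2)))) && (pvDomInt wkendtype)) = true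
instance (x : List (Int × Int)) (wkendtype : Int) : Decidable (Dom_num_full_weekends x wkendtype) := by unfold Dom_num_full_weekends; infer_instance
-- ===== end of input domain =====

-- B replaces A's index loop with its j<len-1 boundary branch by a set computation: it builds
-- the set of week indices whose second day is worked and the set of cyclic predecessors
-- (j-1) mod n of weeks whose first day is worked, and returns the size of their intersection;
-- same cost, different algorithm; neither program mutates x.

-- ===== PORT A =====
def num_full_weekends (x : List (Int × Int)) (wkendtype : Int) : Int :=
  if wkendtype == 2 then
    let L1 := x.map (fun j => j.1 + j.2)
    (L1.map (fun j => if j == 2 then (1 : Int) else 0)).sum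
  else
    (PySem.List.pyRange 0 (x.length : Int) 1).foldl (fun n j =>
      if j < (x.length : Int) - 1 then
        if (PySem.List.pyGetD x j (0, 0)).2 == 1 && (PySem.List.pyGetD x (j + 1) (0, 0)).1 == 1 then
          n + 1
        else n
      else
        if (PySem.List.pyGetD x j (0, 0)).2 == 1 && (PySem.List.pyGetD x 0 (0, 0)).1 == 1 then
          n + 1
        else n) 0

-- ===== PORT B =====
def num_full_weekends_alt (x : List (Int × Int)) (wkendtype : Int) : Int :=
  let n : Int := (x.length : Int)
  if wkendtype == 2 then
    PySem.Set.len (PySem.Set.ofList ((PySem.List.pyRange 0 n 1).filter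
      (fun j => (PySem.List.pyGetD x j (0, 0)).1 + (PySem.List.pyGetD x j (0, 0)).2 == 2)))
  else
    let ends := PySem.Set.ofList ((PySem.List.pyRange 0 n 1).filter
      (fun j => (PySem.List.pyGetD x j (0, 0)).2 == 1))
    let startsPrev := PySem.Set.ofList (((PySem.List.pyRange 0 n 1).filter
      (fun j => (PySem.List.pyGetD x j (0, 0)).1 == 1)).map
      (fun j => PySem.Int.mod (j - 1) n))
    PySem.Set.len (PySem.Set.inter ends startsPrev)

-- ===== PRECONDITION & SPEC =====
def Spec_num_full_weekends (x : List (Int × Int)) (wkendtype : Int) (out : Int) : Prop := out = num_full_weekends_alt x wkendtype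
instance (x : List (Int × Int)) (wkendtype : Int) (out : Int) : Decidable (Spec_num_full_weekends x wkendtype out) := by unfold Spec_num_full_weekends; infer_instance

-- ===== CLAIM =====
def Claim_equal_num_full_weekends : Prop := ∀ (x : List (Int × Int)) (wkendtype : Int), Dom_num_full_weekends x wkendtype → Spec_num_full_weekends x wkendtype (num_full_weekends x wkendtype)

-- ===== LEMMAS AND PROOFS =====

-- (-1) mod n = n - 1 for positive n
theorem pv_neg_one_emod (n : Int) (hn : 0 < n) : (-1 : Int) % n = n - 1 := by
  have h1 : (-1 + n * 1) % n = (-1 : Int) % n := Int.add_mul_emod_self_left (-1) n 1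
  have h2 : (-1 + n * 1 : Int) = n - 1 := by ring
  rw [h2] at h1
  rw [← h1]
  exact Int.emod_eq_of_lt (by omega) (by omega)

-- the length of set(filter) over a duplicate-free list is a countP
theorem pv_len_ofList_filter (l : List Int) (p : Int → Bool) (h : l.Nodup) :
    (PySem.Set.ofList (l.filter p)).len = (l.countP p : Int) := by
  rw [PySem.Set.ofList_eq_self_of_nodup _ (h.filter _)]
  simp [PySem.Set.len, List.countP_eq_length_filter]

-- membership in the set of cyclic predecessors of first-day-worked weeks
theorem pv_mem_startsPrev (x : List (Int × Int)) (j : Int) (h0 : 0 ≤ j)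
    (h1 : j < (x.length : Int)) :
    (j ∈ ((PySem.List.pyRange 0 (x.length : Int) 1).filter
        (fun k => (PySem.List.pyGetD x k (0, 0)).1 == 1)).map
        (fun k => PySem.Int.mod (k - 1) (x.length : Int))) ↔
    ((if j < (x.length : Int) - 1 then (PySem.List.pyGetD x (j + 1) (0, 0)).1
      else (PySem.List.pyGetD x 0 (0, 0)).1) == 1) = true := by
  have hn : 0 < (x.length : Int) := by omega
  simp only [List.mem_map, List.mem_filter, PySem.List.mem_pyRange_one]
  constructor
  · rintro ⟨k, ⟨⟨hk0, hkn⟩, hP⟩, hg⟩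
    rw [PySem.Int.mod_eq_emod_of_pos hn] at hg
    by_cases hk : 1 ≤ k
    · have he : (k - 1) % (x.length : Int) = k - 1 :=
        Int.emod_eq_of_lt (by omega) (by omega)
      rw [he] at hg
      have hjk : k = j + 1 := by omega
      rw [if_pos (by omega)]
      rw [hjk] at hP; exact hP
    · have hk0' : k = 0 := by omega
      rw [hk0'] at hg hP
      norm_num at hg
      rw [pv_neg_one_emod _ hn] at hg
      rw [if_neg (by omega)]
      exact hP
  · intro h
    by_cases hj : j < (x.length : Int) - 1
    · refine ⟨j + 1, ⟨⟨by omega, by omega⟩, ?_⟩, ?_⟩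
      · rw [if_pos hj] at h; exact h
      · rw [PySem.Int.mod_eq_emod_of_pos hn]
        have : j + 1 - 1 = j := by ring
        rw [this]
        exact Int.emod_eq_of_lt h0 h1
    · refine ⟨0, ⟨⟨le_refl 0, hn⟩, ?_⟩, ?_⟩
      · rw [if_neg hj] at h; exact h
      · rw [PySem.Int.mod_eq_emod_of_pos hn]
        norm_num
        rw [pv_neg_one_emod _ hn]
        omega

-- ===== VERDICT =====
theorem num_full_weekends_spec : Claim_equal_num_full_weekends := by
  intro x w _
  unfold Spec_num_full_weekends num_full_weekends num_full_weekends_alt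
  dsimp only
  by_cases hw : w = 2
  · simp only [hw]
    rw [if_pos (by decide), if_pos (by decide)]
    rw [pv_len_ofList_filter _ _ (PySem.List.nodup_pyRange_one 0 (x.length : Int))]
    rw [List.map_map]
    simp only [Function.comp_def]
    rw [PySem.List.sum_map_ite_one_zero]
    have hmap := (List.countP_map (p := fun v : Int × Int => v.1 + v.2 == 2)
      (f := fun j => PySem.List.pyGetD x j (0, 0)) (l := PySem.List.pyRange 0 (x.length : Int) 1)).symm
    simp only [Function.comp_def] at hmap
    rw [PySem.List.map_pyGetD_pyRange_zero' x (0, 0)] at hmap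
    rw [← hmap]
  · rw [if_neg (by simp [hw]), if_neg (by simp [hw])]
    -- A's loop as a count over the index range
    have hbody :
        (fun (n j : Int) =>
          if j < (x.length : Int) - 1 then
            if (PySem.List.pyGetD x j (0, 0)).2 == 1 && (PySem.List.pyGetD x (j + 1) (0, 0)).1 == 1
            then n + 1 else n
          else
            if (PySem.List.pyGetD x j (0, 0)).2 == 1 && (PySem.List.pyGetD x 0 (0, 0)).1 == 1
            then n + 1 else n) =
        (fun (n j : Int) =>
          if ((PySem.List.pyGetD x j (0, 0)).2 == 1 &&
              ((if j < (x.length : Int) - 1 then (PySem.List.pyGetD x (j + 1) (0, 0)).1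
                else (PySem.List.pyGetD x 0 (0, 0)).1) == 1))
          then n + 1 else n) := by
      funext n j
      split_ifs <;> simp_all
    rw [hbody, PySem.List.foldl_if_add_one]
    -- B's intersection as a count over the same range
    have hnd : ((PySem.List.pyRange 0 (x.length : Int) 1).filter
        (fun j => (PySem.List.pyGetD x j (0, 0)).2 == 1)).Nodup :=
      (PySem.List.nodup_pyRange_one 0 (x.length : Int)).filter _
    rw [PySem.Set.ofList_eq_self_of_nodup _ hnd]
    unfold PySem.Set.len PySem.Set.inter
    rw [← List.countP_eq_length_filter, List.countP_filter]
    rw [Int.zero_add]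
    congr 1
    apply List.countP_congr
    intro j hj
    rw [PySem.List.mem_pyRange_one] at hj
    have hmem := pv_mem_startsPrev x j hj.1 hj.2
    have hc : (PySem.Set.ofList (((PySem.List.pyRange 0 (x.length : Int) 1).filter
          (fun k => (PySem.List.pyGetD x k (0, 0)).1 == 1)).map
          (fun k => PySem.Int.mod (k - 1) (x.length : Int)))).contains j =
        ((if j < (x.length : Int) - 1 then (PySem.List.pyGetD x (j + 1) (0, 0)).1
          else (PySem.List.pyGetD x 0 (0, 0)).1) == 1) := by
      rw [Bool.eq_iff_iff, PySem.Set.contains_iff, PySem.Set.mem_ofList]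
      exact hmem
    simp only [hc]
    rw [Bool.and_comm]
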